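-- pv_equiv track=rewrite | github.com/ZEDW/PhenoAlign | suppFunctions.py | get_parent_terms_from_PubSyns
-- ===== SOURCE A (Python) =====
-- def get_parent_terms_from_PubSyns( term_knowledge_from_PubSyns, dict_of_terms_with_confirmed_cui ):
--     #
--     parent_terms_from_PubSyns = {}
--
--     #
--     for term_prefered_str in term_knowledge_from_PubSyns:
--         #
--         set_of_child_terms_as_str = set( term_knowledge_from_PubSyns[term_prefered_str]['child_info'] )
--
--         #
--         for child_term_str in set_of_child_terms_as_str:
--             #
--             if child_term_str not in parent_terms_from_PubSyns:
--                 parent_terms_from_PubSyns.setdefault( child_term_str, set() )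
--
--             # 改成 set 类型
--             parent_terms_from_PubSyns[child_term_str].add( term_prefered_str )
--
--             # 加入父类的CUI
--             if term_prefered_str in dict_of_terms_with_confirmed_cui:
--                 term_prefered_cui = dict_of_terms_with_confirmed_cui[term_prefered_str]
--                 #
--                 parent_terms_from_PubSyns[child_term_str].add( term_prefered_cui )
--
--
--             # 加入 子类的 CUI做 key， 如果有
--             if child_term_str in dict_of_terms_with_confirmed_cui:
--                 child_term_cui = dict_of_terms_with_confirmed_cui[child_term_str]
--                 #
--                 if child_term_cui not in parent_terms_from_PubSyns:
--                     parent_terms_from_PubSyns.setdefault( child_term_cui, set() )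
--
--                 #
--                 parent_terms_from_PubSyns[child_term_cui].add( term_prefered_str )
--
--                 # 加入父类的CUI
--                 if term_prefered_str in dict_of_terms_with_confirmed_cui:
--                     term_prefered_cui = dict_of_terms_with_confirmed_cui[term_prefered_str]
--                     #
--                     parent_terms_from_PubSyns[child_term_cui].add( term_prefered_cui )
--
--
--     #
--     return parent_terms_from_PubSyns
-- ===== SOURCE B (Python) =====
-- def _edge_block(parent, child, cui):
--     keys = [child] + ([cui[child]] if child in cui else [])
--     vals = [parent] + ([cui[parent]] if parent in cui else [])
--     return [(k, v) for k in keys for v in vals]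
--
--
-- def get_parent_terms_from_PubSyns(term_knowledge_from_PubSyns, dict_of_terms_with_confirmed_cui):
--     # Pass 1: flatten the whole input into one flat (key, value) edge list.
--     edges = [e
--              for parent in term_knowledge_from_PubSyns
--              for child in set(term_knowledge_from_PubSyns[parent]['child_info'])
--              for e in _edge_block(parent, child, dict_of_terms_with_confirmed_cui)]
--     # Pass 2: group-by without any mutable dict of sets: take the distinct keys in
--     # first-occurrence order, then compute each key's value set by one filtered scan
--     # over the edge list.
--     keys = list(dict.fromkeys(k for k, _ in edges))
--     return {k: set(v for kk, v in edges if kk == k) for k in keys}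
-- ===== Notes on version B (the rewrite author's own statement) =====
-- stated objective: alternative
-- what changed: B never mutates a dict of sets: it flattens the input into one flat (key, value) edge list and then performs a pure group-by - distinct keys in first-occurrence order via dict.fromkeys, each key's value set computed by its own filtered scan of the edge list - replacing A's single pass of conditional setdefault/add updates on a shared dict.
import Mathlib
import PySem

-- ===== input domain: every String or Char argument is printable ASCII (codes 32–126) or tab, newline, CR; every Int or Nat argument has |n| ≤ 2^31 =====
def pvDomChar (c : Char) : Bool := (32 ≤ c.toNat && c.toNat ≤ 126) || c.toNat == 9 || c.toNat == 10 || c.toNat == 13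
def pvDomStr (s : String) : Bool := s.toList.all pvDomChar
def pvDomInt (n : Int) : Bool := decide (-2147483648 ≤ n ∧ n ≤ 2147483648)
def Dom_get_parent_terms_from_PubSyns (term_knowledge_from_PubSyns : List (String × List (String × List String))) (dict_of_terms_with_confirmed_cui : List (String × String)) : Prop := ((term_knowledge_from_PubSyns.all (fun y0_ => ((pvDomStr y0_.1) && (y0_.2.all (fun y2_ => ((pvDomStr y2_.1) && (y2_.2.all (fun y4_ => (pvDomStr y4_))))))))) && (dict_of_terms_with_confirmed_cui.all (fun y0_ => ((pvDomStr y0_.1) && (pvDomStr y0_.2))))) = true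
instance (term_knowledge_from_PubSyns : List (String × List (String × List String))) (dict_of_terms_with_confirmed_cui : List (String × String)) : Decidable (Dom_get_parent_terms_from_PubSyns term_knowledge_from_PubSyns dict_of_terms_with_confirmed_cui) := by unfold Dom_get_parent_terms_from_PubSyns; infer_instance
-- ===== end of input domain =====

-- B replaces A's single-pass mutated dict of sets by a pure two-pass group-by: a flat
-- (key, value) edge list, then per distinct key one filtered scan computing its value set.


-- ===== PORT A =====
-- one iteration of A's inner 'for child_term_str in set_of_child_terms_as_str' body
def pvStepA (cui : PySem.Dict String String) (parent : String)
    (pt : PySem.Dict String (PySem.Set String)) (child : String) :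
    PySem.Dict String (PySem.Set String) :=
  let pt := if pt.contains child then pt else pt.setdefault child PySem.Set.empty
  let pt := pt.modify child PySem.Set.empty (fun s => PySem.Set.add s parent)
  let pt := match cui.get? parent with
    | some pc => pt.modify child PySem.Set.empty (fun s => PySem.Set.add s pc)
    | none => pt
  match cui.get? child with
  | some cc =>
    let pt := if pt.contains cc then pt else pt.setdefault cc PySem.Set.empty
    let pt := pt.modify cc PySem.Set.empty (fun s => PySem.Set.add s parent)
    (match cui.get? parent with
     | some pc => pt.modify cc PySem.Set.empty (fun s => PySem.Set.add s pc)
     | none => pt)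
  | none => pt

def get_parent_terms_from_PubSyns (term_knowledge_from_PubSyns : List (String × List (String × List String))) (dict_of_terms_with_confirmed_cui : List (String × String)) : List (String × List String) :=
  let cui := PySem.Dict.ofList dict_of_terms_with_confirmed_cui
  let res := (PySem.Dict.ofList term_knowledge_from_PubSyns).items.foldl
    (fun pt p =>
      match (PySem.Dict.ofList p.2).get? "child_info" with
      | some ci => (PySem.Set.ofList ci).foldl (pvStepA cui p.1) pt
      | none => pt)   -- Python raises KeyError here; excluded by Pre_
    PySem.Dict.empty
  res.items

-- ===== PORT B =====
-- _edge_block(parent, child, cui)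
def pvEdgeBlock (parent child : String) (cui : PySem.Dict String String) : List (String × String) :=
  let keys := [child] ++ (match cui.get? child with | some cc => [cc] | none => [])
  let vals := [parent] ++ (match cui.get? parent with | some pc => [pc] | none => [])
  keys.flatMap (fun k => vals.map (fun v => (k, v)))

def get_parent_terms_from_PubSyns_alt (term_knowledge_from_PubSyns : List (String × List (String × List String))) (dict_of_terms_with_confirmed_cui : List (String × String)) : List (String × List String) :=
  let cui := PySem.Dict.ofList dict_of_terms_with_confirmed_cui
  -- Pass 1: the flat edge list
  let edges := (PySem.Dict.ofList term_knowledge_from_PubSyns).items.flatMap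
    (fun p =>
      match (PySem.Dict.ofList p.2).get? "child_info" with
      | some ci => (PySem.Set.ofList ci).flatMap (fun child => pvEdgeBlock p.1 child cui)
      | none => [])   -- Python raises KeyError here; excluded by Pre_
  -- Pass 2: group-by; the dict comprehension's keys are distinct, so its items are this map
  let keys := PySem.List.dedup (edges.map (fun e => e.1))
  keys.map (fun k => (k, PySem.Set.ofList ((edges.filter (fun e => e.1 == k)).map (fun e => e.2))))

-- ===== PRECONDITION & SPEC =====
-- Pre_ excludes exactly the inputs on which A raises KeyError: some parent's inner dict lacks the
-- 'child_info' key (the outer argument is a Python dict, so per key the LAST binding is the one A reads).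
def Pre_get_parent_terms_from_PubSyns (term_knowledge_from_PubSyns : List (String × List (String × List String))) (dict_of_terms_with_confirmed_cui : List (String × String)) : Prop :=
  (term_knowledge_from_PubSyns.all (fun p =>
    ((term_knowledge_from_PubSyns.reverse.find? (fun q => q.1 == p.1)).map
      (fun q => q.2.any (fun r => r.1 == "child_info"))).getD false)) = true
instance (term_knowledge_from_PubSyns : List (String × List (String × List String))) (dict_of_terms_with_confirmed_cui : List (String × String)) : Decidable (Pre_get_parent_terms_from_PubSyns term_knowledge_from_PubSyns dict_of_terms_with_confirmed_cui) := by unfold Pre_get_parent_terms_from_PubSyns; infer_instance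
def pvWitness_get_parent_terms_from_PubSyns : (List (String × List (String × List String))) × (List (String × String)) :=
  ([("p", [("child_info", ["c", "d"])])], [("p", "C1"), ("c", "C2")])

def Spec_get_parent_terms_from_PubSyns (term_knowledge_from_PubSyns : List (String × List (String × List String))) (dict_of_terms_with_confirmed_cui : List (String × String)) (out : List (String × List String)) : Prop := out = get_parent_terms_from_PubSyns_alt term_knowledge_from_PubSyns dict_of_terms_with_confirmed_cui
instance (term_knowledge_from_PubSyns : List (String × List (String × List String))) (dict_of_terms_with_confirmed_cui : List (String × String)) (out : List (String × List String)) : Decidable (Spec_get_parent_terms_from_PubSyns term_knowledge_from_PubSyns dict_of_terms_with_confirmed_cui out) := by unfold Spec_get_parent_terms_from_PubSyns; infer_instance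

-- ===== CLAIM (what is proved, stated in full; the proofs are below) =====
def Claim_equal_get_parent_terms_from_PubSyns : Prop := ∀ (term_knowledge_from_PubSyns : List (String × List (String × List String))) (dict_of_terms_with_confirmed_cui : List (String × String)), Dom_get_parent_terms_from_PubSyns term_knowledge_from_PubSyns dict_of_terms_with_confirmed_cui → Pre_get_parent_terms_from_PubSyns term_knowledge_from_PubSyns dict_of_terms_with_confirmed_cui → Spec_get_parent_terms_from_PubSyns term_knowledge_from_PubSyns dict_of_terms_with_confirmed_cui (get_parent_terms_from_PubSyns term_knowledge_from_PubSyns dict_of_terms_with_confirmed_cui)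

-- ===== LEMMAS AND PROOFS =====

-- the modify step A's four branches reduce to
def pvMod (d : PySem.Dict String (PySem.Set String)) (e : String × String) :
    PySem.Dict String (PySem.Set String) :=
  d.modify e.1 PySem.Set.empty (fun s => PySem.Set.add s e.2)

-- folding over a flatMap is the nested fold
theorem pv_foldl_flatMap {α β γ : Type} (f : γ → β → γ) (g : α → List β) (l : List α) (init : γ) :
    (l.flatMap g).foldl f init = l.foldl (fun acc x => (g x).foldl f acc) init := by
  induction l generalizing init with
  | nil => rfl
  | cons x t ih => simp [List.flatMap_cons, List.foldl_append, ih]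

-- 'if k not in d: d.setdefault(k, set())' followed by 'd[k].add(v)' is one unconditional modify
theorem pv_sd_modify (d : PySem.Dict String (PySem.Set String)) (k : String)
    (f : PySem.Set String → PySem.Set String) :
    (if d.contains k then d else d.setdefault k PySem.Set.empty).modify k PySem.Set.empty f
      = d.modify k PySem.Set.empty f := by
  by_cases h : d.contains k = true
  · rw [if_pos h]
  · rw [if_neg (by simpa using h), PySem.Dict.setdefault_of_not_contains d _ (by simpa using h)]
    simp [PySem.Dict.modify, PySem.Dict.getD_insert_self, PySem.Dict.insert_insert_self,
      PySem.Dict.getD_of_not_contains d _ (by simpa using h)]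

-- one child edge: the fold of pvMod over B's edge block equals A's branchy step
theorem pv_edges_step (cui : PySem.Dict String String) (parent child : String)
    (pt : PySem.Dict String (PySem.Set String)) :
    (pvEdgeBlock parent child cui).foldl pvMod pt = pvStepA cui parent pt child := by
  cases hc : cui.get? child <;> cases hp : cui.get? parent <;>
    simp only [pvEdgeBlock, pvMod, pvStepA, hc, hp, List.flatMap_cons, List.flatMap_nil,
      List.map_cons, List.map_nil, List.append_nil, List.nil_append, List.cons_append,
      List.foldl_cons, List.foldl_nil, pv_sd_modify]

-- the value at key c after a pvMod fold: fold Set.add over the values of the edges keyed c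
theorem pv_getD_foldl_pvMod (l : List (String × String)) (d : PySem.Dict String (PySem.Set String))
    (c : String) :
    (l.foldl pvMod d).getD c PySem.Set.empty
      = ((l.filter (fun e => e.1 == c)).map (fun e => e.2)).foldl PySem.Set.add
          (d.getD c PySem.Set.empty) := by
  induction l generalizing d with
  | nil => rfl
  | cons e t ih =>
    simp only [List.foldl_cons, List.filter_cons, ih]
    by_cases h : e.1 = c
    · simp [h, pvMod, PySem.Dict.getD_modify_self]
    · have hg : (d.modify e.1 PySem.Set.empty fun s => PySem.Set.add s e.2).getD c PySem.Set.empty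
          = d.getD c PySem.Set.empty := by
        rw [PySem.Dict.getD_modify]
        exact if_neg (fun hh => h hh.symm)
      have hg' : (pvMod d e).getD c ([] : PySem.Set String) = d.getD c ([] : PySem.Set String) := hg
      simp [h, hg']

theorem get_parent_terms_from_PubSyns_spec : Claim_equal_get_parent_terms_from_PubSyns := by
  intro tk cuis _ _
  simp only [Spec_get_parent_terms_from_PubSyns, get_parent_terms_from_PubSyns,
    get_parent_terms_from_PubSyns_alt]
  -- name the edge list and reduce A's nested fold to a flat fold of pvMod over it
  set cui := PySem.Dict.ofList cuis with hcui
  set edges := (PySem.Dict.ofList tk).items.flatMap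
    (fun p =>
      match (PySem.Dict.ofList p.2).get? "child_info" with
      | some ci => (PySem.Set.ofList ci).flatMap (fun child => pvEdgeBlock p.1 child cui)
      | none => []) with hedges
  have hA : (PySem.Dict.ofList tk).items.foldl
      (fun pt p =>
        match (PySem.Dict.ofList p.2).get? "child_info" with
        | some ci => (PySem.Set.ofList ci).foldl (pvStepA cui p.1) pt
        | none => pt)
      PySem.Dict.empty = edges.foldl pvMod PySem.Dict.empty := by
    rw [hedges, pv_foldl_flatMap]
    apply PySem.List.foldl_congr_mem
    intro acc p _
    cases h : (PySem.Dict.ofList p.2).get? "child_info" with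
    | none => rfl
    | some ci =>
      simp only
      rw [pv_foldl_flatMap]
      exact (PySem.List.foldl_congr_mem _ _ _ _
        (fun acc' c _ => pv_edges_step cui p.1 c acc')).symm
  rw [hA]
  -- now group: items of the folded dict = map over the deduped keys
  have hnd : (edges.foldl pvMod PySem.Dict.empty).keys.Nodup := by
    simpa [pvMod] using
      PySem.Dict.nodup_keys_foldl_modify_key edges (fun e => e.1) PySem.Set.empty
        (fun _ e s => PySem.Set.add s e.2) PySem.Dict.empty
        (by simp)
  have hkeys : (edges.foldl pvMod PySem.Dict.empty).keys
      = PySem.List.dedup (edges.map (fun e => e.1)) := by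
    simpa [pvMod, PySem.Dict.keys_empty, PySem.List.dedup_eq_ofList] using
      PySem.Dict.keys_foldl_modify_key edges (fun e => e.1) PySem.Set.empty
        (fun _ e s => PySem.Set.add s e.2) PySem.Dict.empty
  rw [PySem.Dict.items_eq_map_keys _ hnd PySem.Set.empty, hkeys]
  refine List.map_congr_left (fun k _ => ?_)
  rw [pv_getD_foldl_pvMod]
  simp [PySem.Set.ofList_eq_foldl, PySem.Dict.getD_empty]
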